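-- pv_equiv track=rewrite | github.com/Goglobal1/hypercore-ml-service | app/routers/universal_router.py | _infer_risk_domain
-- ===== SOURCE A (Python) =====
-- from typing import Dict, Any, Optional, List
--
-- def _infer_risk_domain(lab_data: Dict[str, Any]) -> str:
--     """Infer the most likely risk domain from available biomarkers."""
--     # Count biomarkers in each domain
--     domain_scores = {
--         "sepsis": 0,
--         "cardiac": 0,
--         "oncology": 0,
--         "metabolic": 0,
--         "renal": 0,
--         "hepatic": 0,
--     }
--
--     biomarker_domains = {
--         "crp": ["sepsis", "cardiac"],
--         "wbc": ["sepsis"],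
--         "procalcitonin": ["sepsis"],
--         "lactate": ["sepsis"],
--         "temperature": ["sepsis"],
--         "troponin": ["cardiac"],
--         "bnp": ["cardiac"],
--         "cea": ["oncology"],
--         "ca125": ["oncology"],
--         "psa": ["oncology"],
--         "afp": ["oncology"],
--         "glucose": ["metabolic"],
--         "hba1c": ["metabolic"],
--         "triglycerides": ["metabolic"],
--         "ldl": ["metabolic", "cardiac"],
--         "creatinine": ["renal"],
--         "bun": ["renal"],
--         "egfr": ["renal"],
--         "alt": ["hepatic"],
--         "ast": ["hepatic"],
--         "bilirubin": ["hepatic"],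
--         "albumin": ["hepatic"],
--     }
--
--     for biomarker in lab_data.keys():
--         biomarker_lower = biomarker.lower()
--         if biomarker_lower in biomarker_domains:
--             for domain in biomarker_domains[biomarker_lower]:
--                 domain_scores[domain] += 1
--
--     # Return highest scoring domain, default to general
--     if max(domain_scores.values()) > 0:
--         return max(domain_scores, key=domain_scores.get)
--
--     return "general"
-- ===== SOURCE B (Python) =====
-- DOMAIN_BIOMARKERS = [
--     ("sepsis", frozenset({"crp", "wbc", "procalcitonin", "lactate", "temperature"})),
--     ("cardiac", frozenset({"crp", "troponin", "bnp", "ldl"})),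
--     ("oncology", frozenset({"cea", "ca125", "psa", "afp"})),
--     ("metabolic", frozenset({"glucose", "hba1c", "triglycerides", "ldl"})),
--     ("renal", frozenset({"creatinine", "bun", "egfr"})),
--     ("hepatic", frozenset({"alt", "ast", "bilirubin", "albumin"})),
-- ]
--
-- def _infer_risk_domain(lab_data):
--     """Infer the most likely risk domain from available biomarkers (inverted index, domain-outer loop)."""
--     best_domain, best_score = "general", 0
--     for domain, markers in DOMAIN_BIOMARKERS:
--         score = sum(1 for key in lab_data if key.lower() in markers)
--         if score > best_score:
--             best_domain, best_score = domain, score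
--     return best_domain
-- ===== Notes on version B (the rewrite author's own statement) =====
-- stated objective: alternative
-- what changed: B inverts A's biomarker->domains dict into a fixed domain->frozenset index and loops domain-outer, counting matching keys per domain with a running best, instead of A's key-outer loop incrementing a mutable score dict followed by max()-based selection.
import Mathlib
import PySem

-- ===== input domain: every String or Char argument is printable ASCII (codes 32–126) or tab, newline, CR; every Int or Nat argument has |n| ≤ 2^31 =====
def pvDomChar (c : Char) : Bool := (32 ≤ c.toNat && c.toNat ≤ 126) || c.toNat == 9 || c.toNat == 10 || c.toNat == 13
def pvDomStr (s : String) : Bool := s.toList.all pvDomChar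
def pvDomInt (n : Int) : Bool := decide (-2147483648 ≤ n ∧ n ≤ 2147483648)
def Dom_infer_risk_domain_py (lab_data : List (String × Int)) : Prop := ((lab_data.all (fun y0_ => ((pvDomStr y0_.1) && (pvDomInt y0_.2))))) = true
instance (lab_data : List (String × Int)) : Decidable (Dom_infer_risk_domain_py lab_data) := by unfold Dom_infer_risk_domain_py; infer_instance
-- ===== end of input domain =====

-- B inverts A's biomarker→domains table into a domain→biomarkers index and loops domain-outer,
-- counting matching keys per domain while tracking the running best; same result, alternative decomposition.

-- ===== PORT A =====
-- A's biomarker_domains dict, an exact transliteration (insertion order preserved).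
def biomarker_domains : PySem.Dict String (List String) :=
  PySem.Dict.ofList [("crp", ["sepsis", "cardiac"]), ("wbc", ["sepsis"]), ("procalcitonin", ["sepsis"]), ("lactate", ["sepsis"]), ("temperature", ["sepsis"]), ("troponin", ["cardiac"]), ("bnp", ["cardiac"]), ("cea", ["oncology"]), ("ca125", ["oncology"]), ("psa", ["oncology"]), ("afp", ["oncology"]), ("glucose", ["metabolic"]), ("hba1c", ["metabolic"]), ("triglycerides", ["metabolic"]), ("ldl", ["metabolic", "cardiac"]), ("creatinine", ["renal"]), ("bun", ["renal"]), ("egfr", ["renal"]), ("alt", ["hepatic"]), ("ast", ["hepatic"]), ("bilirubin", ["hepatic"]), ("albumin", ["hepatic"])]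

def infer_risk_domain_py (lab_data : List (String × Int)) : String :=
  -- domain_scores = {...: 0}
  let init : PySem.Dict String Int :=
    PySem.Dict.ofList [("sepsis", 0), ("cardiac", 0), ("oncology", 0), ("metabolic", 0), ("renal", 0), ("hepatic", 0)]
  -- for biomarker in lab_data.keys(): if lower in biomarker_domains: for domain in ...: scores[domain] += 1
  -- (domain_scores[domain] += 1 ported via Dict.modify with default 0: every looked-up domain is present in init, so the default is never used)
  let domain_scores := lab_data.foldl (fun d kv =>
    let biomarker_lower := PySem.Str.lower kv.1
    match biomarker_domains.get? biomarker_lower with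
    | some doms => doms.foldl (fun d domain => d.modify domain 0 (· + 1)) d
    | none => d) init
  -- if max(domain_scores.values()) > 0: return max(domain_scores, key=domain_scores.get)
  -- (values/keys are non-empty literal lists, so max? is always `some`; the getD defaults are never used)
  if (PySem.List.max? domain_scores.values (fun v => v)).getD 0 > 0 then
    (PySem.List.max? domain_scores.keys (fun k => domain_scores.getD k 0)).getD "general"
  else
    "general"

-- ===== PORT B =====
-- B's inverted index DOMAIN_BIOMARKERS, in the fixed domain order.
def domain_biomarkers : List (String × PySem.Set String) :=
  [("sepsis", PySem.Set.ofList ["crp", "wbc", "procalcitonin", "lactate", "temperature"]),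
   ("cardiac", PySem.Set.ofList ["crp", "troponin", "bnp", "ldl"]),
   ("oncology", PySem.Set.ofList ["cea", "ca125", "psa", "afp"]),
   ("metabolic", PySem.Set.ofList ["glucose", "hba1c", "triglycerides", "ldl"]),
   ("renal", PySem.Set.ofList ["creatinine", "bun", "egfr"]),
   ("hepatic", PySem.Set.ofList ["alt", "ast", "bilirubin", "albumin"])]

def infer_risk_domain_py_alt (lab_data : List (String × Int)) : String :=
  (domain_biomarkers.foldl (fun best dm =>
      -- score = sum(1 for key in lab_data if key.lower() in markers)
      let score : Int := (lab_data.countP (fun kv => dm.2.contains (PySem.Str.lower kv.1)) : Int)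
      if score > best.2 then (dm.1, score) else best)
    ("general", (0 : Int))).1

-- ===== PRECONDITION & SPEC =====
def Spec_infer_risk_domain_py (lab_data : List (String × Int)) (out : String) : Prop := out = infer_risk_domain_py_alt lab_data
instance (lab_data : List (String × Int)) (out : String) : Decidable (Spec_infer_risk_domain_py lab_data out) := by unfold Spec_infer_risk_domain_py; infer_instance

-- ===== CLAIM (what is proved, stated in full; the proofs are below) =====
def Claim_equal_infer_risk_domain_py : Prop := ∀ (lab_data : List (String × Int)), Dom_infer_risk_domain_py lab_data → Spec_infer_risk_domain_py lab_data (infer_risk_domain_py lab_data)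

-- ===== LEMMAS AND PROOFS =====

-- the six marker sets, by name (they are B's table entries)
def sepsisSet : PySem.Set String := PySem.Set.ofList ["crp", "wbc", "procalcitonin", "lactate", "temperature"]
def cardiacSet : PySem.Set String := PySem.Set.ofList ["crp", "troponin", "bnp", "ldl"]
def oncologySet : PySem.Set String := PySem.Set.ofList ["cea", "ca125", "psa", "afp"]
def metabolicSet : PySem.Set String := PySem.Set.ofList ["glucose", "hba1c", "triglycerides", "ldl"]
def renalSet : PySem.Set String := PySem.Set.ofList ["creatinine", "bun", "egfr"]
def hepaticSet : PySem.Set String := PySem.Set.ofList ["alt", "ast", "bilirubin", "albumin"]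

-- the score dict A's loop maintains, with symbolic values
def mkD (a b c d e f : Int) : PySem.Dict String Int :=
  PySem.Dict.mk [("sepsis", a), ("cardiac", b), ("oncology", c), ("metabolic", d), ("renal", e), ("hepatic", f)]

-- indicator: 1 if the (lowercased) name is in the marker set
def ind (m : PySem.Set String) (s : String) : Int := if m.contains s then 1 else 0

-- how many keys of l score for marker set m (exactly B's per-domain score)
def cnt (m : PySem.Set String) (l : List (String × Int)) : Int :=
  (l.countP (fun kv => m.contains (PySem.Str.lower kv.1)) : Int)

def stepCore (d : PySem.Dict String Int) (s : String) : PySem.Dict String Int :=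
  match biomarker_domains.get? s with
  | some doms => doms.foldl (fun d domain => d.modify domain 0 (· + 1)) d
  | none => d

def stepA (d : PySem.Dict String Int) (kv : String × Int) : PySem.Dict String Int :=
  stepCore d (PySem.Str.lower kv.1)

set_option maxHeartbeats 1000000 in
lemma stepCore_eq (s : String) (a b c d e f : Int) :
    stepCore (mkD a b c d e f) s =
    mkD (a + ind sepsisSet s) (b + ind cardiacSet s) (c + ind oncologySet s)
        (d + ind metabolicSet s) (e + ind renalSet s) (f + ind hepaticSet s) := by
  by_cases h1 : "crp" = s
  · obtain rfl := h1
    show mkD (a + 1) (b + 1) c d e f = _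
    simp [mkD, ind, sepsisSet, cardiacSet, oncologySet, metabolicSet, renalSet, hepaticSet]
  by_cases h2 : "wbc" = s
  · obtain rfl := h2
    show mkD (a + 1) b c d e f = _
    simp [mkD, ind, sepsisSet, cardiacSet, oncologySet, metabolicSet, renalSet, hepaticSet]
  by_cases h3 : "procalcitonin" = s
  · obtain rfl := h3
    show mkD (a + 1) b c d e f = _
    simp [mkD, ind, sepsisSet, cardiacSet, oncologySet, metabolicSet, renalSet, hepaticSet]
  by_cases h4 : "lactate" = s
  · obtain rfl := h4
    show mkD (a + 1) b c d e f = _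
    simp [mkD, ind, sepsisSet, cardiacSet, oncologySet, metabolicSet, renalSet, hepaticSet]
  by_cases h5 : "temperature" = s
  · obtain rfl := h5
    show mkD (a + 1) b c d e f = _
    simp [mkD, ind, sepsisSet, cardiacSet, oncologySet, metabolicSet, renalSet, hepaticSet]
  by_cases h6 : "troponin" = s
  · obtain rfl := h6
    show mkD a (b + 1) c d e f = _
    simp [mkD, ind, sepsisSet, cardiacSet, oncologySet, metabolicSet, renalSet, hepaticSet]
  by_cases h7 : "bnp" = s
  · obtain rfl := h7
    show mkD a (b + 1) c d e f = _
    simp [mkD, ind, sepsisSet, cardiacSet, oncologySet, metabolicSet, renalSet, hepaticSet]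
  by_cases h8 : "cea" = s
  · obtain rfl := h8
    show mkD a b (c + 1) d e f = _
    simp [mkD, ind, sepsisSet, cardiacSet, oncologySet, metabolicSet, renalSet, hepaticSet]
  by_cases h9 : "ca125" = s
  · obtain rfl := h9
    show mkD a b (c + 1) d e f = _
    simp [mkD, ind, sepsisSet, cardiacSet, oncologySet, metabolicSet, renalSet, hepaticSet]
  by_cases h10 : "psa" = s
  · obtain rfl := h10
    show mkD a b (c + 1) d e f = _
    simp [mkD, ind, sepsisSet, cardiacSet, oncologySet, metabolicSet, renalSet, hepaticSet]
  by_cases h11 : "afp" = s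
  · obtain rfl := h11
    show mkD a b (c + 1) d e f = _
    simp [mkD, ind, sepsisSet, cardiacSet, oncologySet, metabolicSet, renalSet, hepaticSet]
  by_cases h12 : "glucose" = s
  · obtain rfl := h12
    show mkD a b c (d + 1) e f = _
    simp [mkD, ind, sepsisSet, cardiacSet, oncologySet, metabolicSet, renalSet, hepaticSet]
  by_cases h13 : "hba1c" = s
  · obtain rfl := h13
    show mkD a b c (d + 1) e f = _
    simp [mkD, ind, sepsisSet, cardiacSet, oncologySet, metabolicSet, renalSet, hepaticSet]
  by_cases h14 : "triglycerides" = s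
  · obtain rfl := h14
    show mkD a b c (d + 1) e f = _
    simp [mkD, ind, sepsisSet, cardiacSet, oncologySet, metabolicSet, renalSet, hepaticSet]
  by_cases h15 : "ldl" = s
  · obtain rfl := h15
    show mkD a (b + 1) c (d + 1) e f = _
    simp [mkD, ind, sepsisSet, cardiacSet, oncologySet, metabolicSet, renalSet, hepaticSet]
  by_cases h16 : "creatinine" = s
  · obtain rfl := h16
    show mkD a b c d (e + 1) f = _
    simp [mkD, ind, sepsisSet, cardiacSet, oncologySet, metabolicSet, renalSet, hepaticSet]
  by_cases h17 : "bun" = s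
  · obtain rfl := h17
    show mkD a b c d (e + 1) f = _
    simp [mkD, ind, sepsisSet, cardiacSet, oncologySet, metabolicSet, renalSet, hepaticSet]
  by_cases h18 : "egfr" = s
  · obtain rfl := h18
    show mkD a b c d (e + 1) f = _
    simp [mkD, ind, sepsisSet, cardiacSet, oncologySet, metabolicSet, renalSet, hepaticSet]
  by_cases h19 : "alt" = s
  · obtain rfl := h19
    show mkD a b c d e (f + 1) = _
    simp [mkD, ind, sepsisSet, cardiacSet, oncologySet, metabolicSet, renalSet, hepaticSet]
  by_cases h20 : "ast" = s
  · obtain rfl := h20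
    show mkD a b c d e (f + 1) = _
    simp [mkD, ind, sepsisSet, cardiacSet, oncologySet, metabolicSet, renalSet, hepaticSet]
  by_cases h21 : "bilirubin" = s
  · obtain rfl := h21
    show mkD a b c d e (f + 1) = _
    simp [mkD, ind, sepsisSet, cardiacSet, oncologySet, metabolicSet, renalSet, hepaticSet]
  by_cases h22 : "albumin" = s
  · obtain rfl := h22
    show mkD a b c d e (f + 1) = _
    simp [mkD, ind, sepsisSet, cardiacSet, oncologySet, metabolicSet, renalSet, hepaticSet]
  have hbd : biomarker_domains = PySem.Dict.mk [("crp", ["sepsis", "cardiac"]), ("wbc", ["sepsis"]), ("procalcitonin", ["sepsis"]), ("lactate", ["sepsis"]), ("temperature", ["sepsis"]), ("troponin", ["cardiac"]), ("bnp", ["cardiac"]), ("cea", ["oncology"]), ("ca125", ["oncology"]), ("psa", ["oncology"]), ("afp", ["oncology"]), ("glucose", ["metabolic"]), ("hba1c", ["metabolic"]), ("triglycerides", ["metabolic"]), ("ldl", ["metabolic", "cardiac"]), ("creatinine", ["renal"]), ("bun", ["renal"]), ("egfr", ["renal"]), ("alt", ["hepatic"]), ("ast", ["hepatic"]), ("bilirubin",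 ["hepatic"]), ("albumin", ["hepatic"])] := by decide
  simp [stepCore, hbd, PySem.Dict.get?_mk_cons, beq_iff_eq, ind,
      sepsisSet, cardiacSet, oncologySet, metabolicSet, renalSet, hepaticSet,
      PySem.Set.contains, PySem.Set.ofList, PySem.Set.add, PySem.Set.empty,
      h1, Ne.symm h1, h2, Ne.symm h2, h3, Ne.symm h3, h4, Ne.symm h4, h5, Ne.symm h5, h6, Ne.symm h6, h7, Ne.symm h7, h8, Ne.symm h8, h9, Ne.symm h9, h10, Ne.symm h10, h11, Ne.symm h11, h12, Ne.symm h12, h13, Ne.symm h13, h14, Ne.symm h14, h15, Ne.symm h15, h16, Ne.symm h16, h17, Ne.symm h17, h18, Ne.symm h18, h19, Ne.symm h19, h20, Ne.symm h20, h21, Ne.symm h21, h22, Ne.symm h22]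
  rfl

lemma stepA_eq (kv : String × Int) (a b c d e f : Int) :
    stepA (mkD a b c d e f) kv =
    mkD (a + ind sepsisSet (PySem.Str.lower kv.1)) (b + ind cardiacSet (PySem.Str.lower kv.1))
        (c + ind oncologySet (PySem.Str.lower kv.1)) (d + ind metabolicSet (PySem.Str.lower kv.1))
        (e + ind renalSet (PySem.Str.lower kv.1)) (f + ind hepaticSet (PySem.Str.lower kv.1)) :=
  stepCore_eq (PySem.Str.lower kv.1) a b c d e f

lemma cnt_cons (m : PySem.Set String) (kv : String × Int) (t : List (String × Int)) :
    cnt m (kv :: t) = ind m (PySem.Str.lower kv.1) + cnt m t := by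
  simp only [cnt, ind, List.countP_cons]
  split_ifs <;> push_cast <;> ring

lemma foldA_eq (l : List (String × Int)) (a b c d e f : Int) :
    l.foldl stepA (mkD a b c d e f) =
    mkD (a + cnt sepsisSet l) (b + cnt cardiacSet l) (c + cnt oncologySet l)
        (d + cnt metabolicSet l) (e + cnt renalSet l) (f + cnt hepaticSet l) := by
  induction l generalizing a b c d e f with
  | nil => simp [cnt]
  | cons kv t ih =>
    rw [List.foldl_cons, stepA_eq, ih]
    simp only [cnt_cons, add_assoc]

lemma cnt_nonneg (m : PySem.Set String) (l : List (String × Int)) : 0 ≤ cnt m l := by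
  unfold cnt; exact Int.natCast_nonneg _

-- B-style running-best fold over (domain, score) pairs
def bestFold (g : String × Int) (ds : List (String × Int)) : String × Int :=
  ds.foldl (fun best p => if p.2 > best.2 then p else best) g

lemma bestFold_le (ds : List (String × Int)) (m : String × Int) : m.2 ≤ (bestFold m ds).2 := by
  induction ds generalizing m with
  | nil => simp [bestFold]
  | cons p t ih =>
    simp only [bestFold, List.foldl_cons]
    by_cases h : p.2 > m.2
    · rw [if_pos h]; exact le_of_lt (lt_of_lt_of_le h (ih p))
    · rw [if_neg h]; exact ih m

lemma bestFold_congr (ds : List (String × Int)) (m g : String × Int) (h : m.2 = g.2) :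
    (bestFold m ds = bestFold g ds ∧ g.2 < (bestFold m ds).2) ∨ (bestFold m ds = m ∧ bestFold g ds = g) := by
  induction ds generalizing m g with
  | nil => right; exact ⟨rfl, rfl⟩
  | cons p t ih =>
    simp only [bestFold, List.foldl_cons]
    by_cases hp : p.2 > m.2
    · rw [if_pos hp, if_pos (h ▸ hp)]
      left
      exact ⟨rfl, lt_of_lt_of_le (h ▸ hp) (bestFold_le t p)⟩
    · rw [if_neg hp, if_neg (h ▸ hp)]
      exact ih m g h

lemma max?_step {α : Type} (key : α → Int) (a b : α) (T : List α) :
    PySem.List.max? (a :: b :: T) key = PySem.List.max? ((if key a < key b then b else a) :: T) key := by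
  by_cases h : key a < key b
  · simp only [PySem.List.max?, List.foldl_cons, if_pos h]
  · simp only [PySem.List.max?, List.foldl_cons, if_neg h]

lemma vfold_eq (ds : List (String × Int)) (m : String × Int) :
    PySem.List.max? (m.2 :: ds.map Prod.snd) (fun v => v) = some ((bestFold m ds).2) := by
  induction ds generalizing m with
  | nil => rfl
  | cons p t ih =>
    simp only [List.map_cons]
    rw [max?_step (fun v => v) m.2 p.2]
    simp only [bestFold, List.foldl_cons]
    by_cases h : m.2 < p.2
    · simp only [if_pos h, gt_iff_lt]
      exact ih p
    · simp only [if_neg h, gt_iff_lt]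
      exact ih m

lemma kfold_eq (key : String → Int) (ds : List (String × Int)) (m : String × Int)
    (hds : ∀ p ∈ ds, key p.1 = p.2) (hm : key m.1 = m.2) :
    PySem.List.max? (m.1 :: ds.map Prod.fst) key = some ((bestFold m ds).1) := by
  induction ds generalizing m with
  | nil => rfl
  | cons p t ih =>
    simp only [List.map_cons]
    rw [max?_step key m.1 p.1]
    have hp : key p.1 = p.2 := hds p (by simp)
    rw [hm, hp]
    simp only [bestFold, List.foldl_cons]
    by_cases h : m.2 < p.2
    · simp only [if_pos h, gt_iff_lt]
      exact ih p (fun q hq => hds q (by simp [hq])) hp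
    · simp only [if_neg h, gt_iff_lt]
      exact ih m (fun q hq => hds q (by simp [hq])) hm

lemma final_eq (rest : List (String × Int)) (m : String × Int) (hm : 0 ≤ m.2) :
    (bestFold (if m.2 > 0 then m else ("general", 0)) rest).1 =
    if (bestFold m rest).2 > 0 then (bestFold m rest).1 else "general" := by
  by_cases h : m.2 > 0
  · rw [if_pos h, if_pos (lt_of_lt_of_le h (bestFold_le rest m))]
  · have hm0 : m.2 = 0 := le_antisymm (not_lt.mp h) hm
    rw [if_neg h]
    rcases bestFold_congr rest m ("general", 0) (by simp [hm0]) with ⟨heq, hlt⟩ | ⟨h1, h2⟩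
    · rw [← heq, if_pos hlt]
    · rw [h1, h2, if_neg (by rw [hm0]; exact lt_irrefl 0)]

set_option maxHeartbeats 1000000 in
lemma select_eq (v1 v2 v3 v4 v5 v6 : Int) (h1 : 0 ≤ v1) :
    (if ((PySem.List.max? (mkD v1 v2 v3 v4 v5 v6).values (fun v => v)).getD 0) > 0 then
       (PySem.List.max? (mkD v1 v2 v3 v4 v5 v6).keys (fun k => (mkD v1 v2 v3 v4 v5 v6).getD k 0)).getD "general"
     else "general")
    = ([("sepsis", v1), ("cardiac", v2), ("oncology", v3), ("metabolic", v4), ("renal", v5), ("hepatic", v6)].foldl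
        (fun (best : String × Int) dm => if dm.2 > best.2 then (dm.1, dm.2) else best) ("general", (0 : Int))).1 := by
  have hrest : ∀ p ∈ [("cardiac", v2), ("oncology", v3), ("metabolic", v4), ("renal", v5), ("hepatic", v6)],
      (fun k => (mkD v1 v2 v3 v4 v5 v6).getD k 0) p.1 = p.2 := by
    intro p hp
    fin_cases hp <;> rfl
  have hv : (mkD v1 v2 v3 v4 v5 v6).values
      = ((("sepsis", v1) : String × Int).2 :: [("cardiac", v2), ("oncology", v3), ("metabolic", v4), ("renal", v5), ("hepatic", v6)].map Prod.snd) := rfl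
  have hk : (mkD v1 v2 v3 v4 v5 v6).keys
      = ((("sepsis", v1) : String × Int).1 :: [("cardiac", v2), ("oncology", v3), ("metabolic", v4), ("renal", v5), ("hepatic", v6)].map Prod.fst) := rfl
  rw [hv, hk, vfold_eq [("cardiac", v2), ("oncology", v3), ("metabolic", v4), ("renal", v5), ("hepatic", v6)] ("sepsis", v1),
      kfold_eq (fun k => (mkD v1 v2 v3 v4 v5 v6).getD k 0) _ ("sepsis", v1) hrest rfl]
  rw [show ([("sepsis", v1), ("cardiac", v2), ("oncology", v3), ("metabolic", v4), ("renal", v5), ("hepatic", v6)].foldl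
        (fun (best : String × Int) dm => if dm.2 > best.2 then (dm.1, dm.2) else best) ("general", (0 : Int)))
        = bestFold (if v1 > 0 then ("sepsis", v1) else ("general", 0)) [("cardiac", v2), ("oncology", v3), ("metabolic", v4), ("renal", v5), ("hepatic", v6)]
      from rfl]
  rw [show (if v1 > 0 then (("sepsis", v1) : String × Int) else ("general", 0))
        = (if (("sepsis", v1) : String × Int).2 > 0 then ("sepsis", v1) else ("general", 0)) from rfl]
  rw [final_eq _ ("sepsis", v1) h1]
  rfl

theorem infer_risk_domain_py_spec : Claim_equal_infer_risk_domain_py := by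
  intro l _
  unfold Spec_infer_risk_domain_py infer_risk_domain_py infer_risk_domain_py_alt
  have hi : PySem.Dict.ofList [("sepsis", (0:Int)), ("cardiac", 0), ("oncology", 0), ("metabolic", 0), ("renal", 0), ("hepatic", 0)] = mkD 0 0 0 0 0 0 := by decide
  rw [hi]
  show (if ((PySem.List.max? (l.foldl stepA (mkD 0 0 0 0 0 0)).values (fun v => v)).getD 0) > 0 then
          (PySem.List.max? (l.foldl stepA (mkD 0 0 0 0 0 0)).keys
            (fun k => (l.foldl stepA (mkD 0 0 0 0 0 0)).getD k 0)).getD "general"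
        else "general") = _
  rw [foldA_eq]
  simp only [zero_add]
  exact select_eq (cnt sepsisSet l) (cnt cardiacSet l) (cnt oncologySet l) (cnt metabolicSet l)
    (cnt renalSet l) (cnt hepaticSet l) (cnt_nonneg _ _)
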